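-- pv_equiv track=rewrite | github.com/LCT-study/lct-study | ayeon/dfsbfs/괄호변환.py | getBalancePoint
-- ===== SOURCE A (Python) =====
-- def getBalancePoint(arr):
--     count = 0
--     for i in range(len(arr)):
--         if arr[i]=="(":
--             count+=1
--         else:
--             count-=1
--         if count==0:
--             return i
-- ===== SOURCE B (Python) =====
-- def getBalancePoint(arr):
--     balances = []
--     total = 0
--     for x in arr:
--         total += 1 if x == "(" else -1
--         balances.append(total)
--     try:
--         return balances.index(0)
--     except ValueError:
--         return None
-- ===== Notes on version B (the rewrite author's own statement) =====
-- stated objective: alternative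
-- what changed: Replaces the single early-returning counter scan with two separate passes: first materialize the full list of prefix balances, then locate the first zero with list.index wrapped in try/except.
-- outside the precondition, e.g. on getBalancePoint(['(']): A returns None, B returns None
import Mathlib
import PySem

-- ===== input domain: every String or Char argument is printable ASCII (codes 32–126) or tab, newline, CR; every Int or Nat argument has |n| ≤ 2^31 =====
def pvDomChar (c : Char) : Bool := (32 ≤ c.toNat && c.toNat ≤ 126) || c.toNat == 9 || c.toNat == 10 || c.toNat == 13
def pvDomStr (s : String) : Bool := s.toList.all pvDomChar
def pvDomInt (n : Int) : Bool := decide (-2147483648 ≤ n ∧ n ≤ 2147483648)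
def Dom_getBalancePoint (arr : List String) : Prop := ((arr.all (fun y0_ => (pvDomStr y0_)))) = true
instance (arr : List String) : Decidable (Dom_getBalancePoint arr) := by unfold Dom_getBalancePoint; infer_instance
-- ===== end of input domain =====

-- B builds the full prefix-balance table and then searches it for the first zero,
-- instead of A's single early-returning counter scan (alternative decomposition, same cost).


-- ===== PORT A =====
-- A's for-loop over indices with the running count and the early return;
-- `none` is Python's fall-through `return None` (excluded by Pre_), mapped to 0 at top level.
def pvALoop : List String → Nat → Int → Option Nat
  | [], _, _ => none
  | s :: rest, i, count =>
    let c := if s = "(" then count + 1 else count - 1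
    if c = 0 then some i else pvALoop rest (i + 1) c

def getBalancePoint (arr : List String) : Int :=
  match pvALoop arr 0 0 with
  | some i => (i : Int)
  | none => 0

-- ===== PORT B =====
-- Source B pass 1: append the running total for each element (the prefix-balance table).
def pvBuild : List String → Int → List Int
  | [], _ => []
  | x :: rest, total =>
    let t := total + (if x = "(" then 1 else -1)
    t :: pvBuild rest t

-- Source B pass 2: balances.index(0); ValueError (= none, excluded by Pre_) mapped to 0.
def getBalancePoint_alt (arr : List String) : Int :=
  let balances := pvBuild arr 0
  match PySem.List.index? balances (0 : Int) with
  | some i => (i : Int)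
  | none => 0

-- ===== PRECONDITION & SPEC =====
-- Pre_ excludes exactly the inputs whose running paren balance never reaches zero: there Python A
-- falls through and returns None, which is not a value of the declared Int type (B does the same).
def Pre_getBalancePoint (arr : List String) : Prop :=
  ∃ k < arr.length, ((arr.take (k + 1)).map (fun s => if s = "(" then (1 : Int) else -1)).sum = 0
instance (arr : List String) : Decidable (Pre_getBalancePoint arr) := by
  unfold Pre_getBalancePoint; infer_instance

def pvWitness_getBalancePoint : List String := ["(", ")"]

def Spec_getBalancePoint (arr : List String) (out : Int) : Prop := out = getBalancePoint_alt arr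
instance (arr : List String) (out : Int) : Decidable (Spec_getBalancePoint arr out) := by
  unfold Spec_getBalancePoint; infer_instance

-- ===== CLAIM (what is proved, stated in full; the proofs are below) =====
def Claim_equal_getBalancePoint : Prop := ∀ (arr : List String), Dom_getBalancePoint arr → Pre_getBalancePoint arr → Spec_getBalancePoint arr (getBalancePoint arr)

-- ===== LEMMAS AND PROOFS =====
-- A's early-returning scan from index i with count c finds the first zero of the
-- prefix-balance table built from c, shifted by i.
theorem pvALoop_eq_index (l : List String) (i : Nat) (c : Int) :
    pvALoop l i c = (PySem.List.index? (pvBuild l c) (0 : Int)).map (· + i) := by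
  induction l generalizing i c with
  | nil => simp [pvALoop, pvBuild, PySem.List.index?_eq_idxOf?, List.idxOf?]
  | cons x rest ih =>
    simp only [pvALoop, pvBuild]
    by_cases hb : c + (if x = "(" then 1 else -1) = 0
    · have h : (if x = "(" then c + 1 else c - 1) = 0 := by split_ifs at hb ⊢ <;> omega
      rw [if_pos h, hb, PySem.List.index?_cons_self]
      simp
    · have h : (if x = "(" then c + 1 else c - 1) ≠ 0 := by split_ifs at hb ⊢ <;> omega
      rw [if_neg h, PySem.List.index?_cons_of_ne _ hb, ih, Option.map_map]
      have he : (if x = "(" then c + 1 else c - 1) = c + (if x = "(" then 1 else -1) := by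
        split_ifs <;> ring
      rw [he]
      congr 1
      funext k
      simp [Function.comp]
      omega

-- ===== VERDICT (by name: the statement is the Claim_ definition above) =====
theorem getBalancePoint_spec : Claim_equal_getBalancePoint := by
  intro arr _ _
  unfold Spec_getBalancePoint getBalancePoint getBalancePoint_alt
  rw [pvALoop_eq_index]
  cases h : PySem.List.index? (pvBuild arr 0) (0 : Int) <;>
    rw [PySem.List.index?_eq_idxOf?] at h <;> simp [h]
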